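-- pv_equiv track=rewrite | github.com/Radar105/rag-system | rag_system/chunker.py | _group_dialogue_turns
-- ===== SOURCE A (Python) =====
-- from typing import List, Dict, Tuple
--
-- def _group_dialogue_turns(messages: List[Dict]) -> List[List[Dict]]:
--     """
--     Group messages into dialogue turns (Q&A pairs).
--     Each turn = user message(s) + following assistant response.
--     """
--     turns = []
--     current_turn = []
--
--     for msg in messages:
--         if msg['role'] == 'user':
--             # Start new turn if we have accumulated messages
--             if current_turn:
--                 turns.append(current_turn)
--                 current_turn = []
--             current_turn.append(msg)
--         else:  # assistant
--             current_turn.append(msg)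
--             # Complete the turn after assistant response
--             if current_turn:
--                 turns.append(current_turn)
--                 current_turn = []
--
--     # Add any remaining messages
--     if current_turn:
--         turns.append(current_turn)
--
--     return turns
-- ===== SOURCE B (Python) =====
-- from typing import List, Dict
--
-- def _group_dialogue_turns(messages: List[Dict]) -> List[List[Dict]]:
--     """Group messages into dialogue turns by consuming one or two messages
--     at a time: a user message immediately followed by a non-user message
--     forms a pair; every other message stands alone."""
--     turns = []
--     i = 0
--     n = len(messages)
--     while i < n:
--         if messages[i]['role'] == 'user' and i + 1 < n and messages[i + 1]['role'] != 'user':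
--             turns.append([messages[i], messages[i + 1]])
--             i += 2
--         else:
--             turns.append([messages[i]])
--             i += 1
--     return turns
-- ===== Notes on version B (the rewrite author's own statement) =====
-- stated objective: alternative
-- what changed: Replaces the flush-on-event accumulator state machine with a direct scan that consumes one or two messages per step, emitting a [user, non-user] pair or a singleton immediately, with no current-turn buffer or flush logic.
import Mathlib
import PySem

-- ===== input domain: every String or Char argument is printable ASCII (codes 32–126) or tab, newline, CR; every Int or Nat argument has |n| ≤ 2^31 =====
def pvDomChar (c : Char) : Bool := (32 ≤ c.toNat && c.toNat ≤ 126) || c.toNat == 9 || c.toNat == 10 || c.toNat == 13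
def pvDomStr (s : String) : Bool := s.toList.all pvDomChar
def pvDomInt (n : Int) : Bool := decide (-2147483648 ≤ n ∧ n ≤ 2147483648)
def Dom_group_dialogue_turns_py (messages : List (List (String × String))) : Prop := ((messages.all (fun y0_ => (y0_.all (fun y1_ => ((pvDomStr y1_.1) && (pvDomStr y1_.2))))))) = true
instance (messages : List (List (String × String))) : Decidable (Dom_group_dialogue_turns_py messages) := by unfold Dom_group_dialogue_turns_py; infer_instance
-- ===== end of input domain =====

-- B is an ALTERNATIVE decomposition of the same O(n) grouping: A keeps a
-- current-turn buffer and flushes it on events; B consumes one or two messages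
-- per step with no buffer.  Equivalence is proved on Pre_ (every message has a
-- 'role' key; elsewhere both Pythons raise KeyError).

-- msg['role'] (Pre_ guarantees the key is present, so getD never fires)
def pvRole (m : List (String × String)) : String := ((PySem.Dict.mk m).get? "role").getD ""

-- ===== PORT A =====
-- A's loop: state = (turns, current_turn); flush current_turn before a user
-- message and after an assistant (non-user) message; flush the remainder at the end.
def pvGoA : List (List (String × String)) → List (List (List (String × String))) →
    List (List (String × String)) → List (List (List (String × String)))
  | [], turns, current => if current ≠ [] then turns ++ [current] else turns
  | m :: rest, turns, current =>
      if pvRole m == "user" then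
        if current ≠ [] then pvGoA rest (turns ++ [current]) [m]
        else pvGoA rest turns [m]
      else
        -- append m, then flush (current ++ [m] is never empty)
        pvGoA rest (turns ++ [current ++ [m]]) []

def group_dialogue_turns_py (messages : List (List (String × String))) : List (List (List (String × String))) :=
  pvGoA messages [] []

-- ===== PORT B =====
-- B's while loop over an index, consuming 1 or 2 messages per step, as
-- recursion on the remaining suffix.
def group_dialogue_turns_py_alt : List (List (String × String)) → List (List (List (String × String)))
  | [] => []
  | [m] => [[m]]
  | m1 :: m2 :: rest =>
      if pvRole m1 == "user" && !(pvRole m2 == "user") then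
        [m1, m2] :: group_dialogue_turns_py_alt rest
      else
        [m1] :: group_dialogue_turns_py_alt (m2 :: rest)

-- ===== PRECONDITION & SPEC =====
-- Pre_: every message carries a 'role' key; on any other input both the
-- original Python and B raise KeyError at msg['role'].
def Pre_group_dialogue_turns_py (messages : List (List (String × String))) : Prop :=
  ∀ m ∈ messages, ((PySem.Dict.mk m).get? "role").isSome = true
instance (messages : List (List (String × String))) : Decidable (Pre_group_dialogue_turns_py messages) := by unfold Pre_group_dialogue_turns_py; infer_instance

def pvWitness_group_dialogue_turns_py : (List (List (String × String))) :=
  [[("role", "user"), ("content", "hi")], [("role", "assistant"), ("content", "hello")]]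

def Spec_group_dialogue_turns_py (messages : List (List (String × String))) (out : List (List (List (String × String)))) : Prop := out = group_dialogue_turns_py_alt messages
instance (messages : List (List (String × String))) (out : List (List (List (String × String)))) : Decidable (Spec_group_dialogue_turns_py messages out) := by unfold Spec_group_dialogue_turns_py; infer_instance

-- ===== CLAIM (what is proved, stated in full; the proofs are below) =====
def Claim_equal_group_dialogue_turns_py : Prop := ∀ (messages : List (List (String × String))), Dom_group_dialogue_turns_py messages → Pre_group_dialogue_turns_py messages → Spec_group_dialogue_turns_py messages (group_dialogue_turns_py messages)

-- ===== LEMMAS AND PROOFS =====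

-- B emits a singleton whenever the head is not a user message.
lemma alt_cons_nonuser (m : List (String × String)) (rest : List (List (String × String)))
    (h : ¬ (pvRole m == "user") = true) :
    group_dialogue_turns_py_alt (m :: rest) = [m] :: group_dialogue_turns_py_alt rest := by
  cases rest with
  | nil => simp [group_dialogue_turns_py_alt]
  | cons m2 rest' => simp [group_dialogue_turns_py_alt, h]

-- Invariant of A's loop: current is [] or a single user message, and then the
-- loop computes turns ++ B (current ++ remaining messages).
lemma goA_eq_alt : ∀ (msgs : List (List (String × String)))
    (turns : List (List (List (String × String)))) (cur : List (List (String × String))),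
    (cur = [] ∨ ∃ u, cur = [u] ∧ (pvRole u == "user") = true) →
    pvGoA msgs turns cur = turns ++ group_dialogue_turns_py_alt (cur ++ msgs) := by
  intro msgs
  induction msgs with
  | nil =>
      intro turns cur hcur
      rcases hcur with rfl | ⟨u, rfl, hu⟩
      · simp [pvGoA, group_dialogue_turns_py_alt]
      · simp [pvGoA, group_dialogue_turns_py_alt]
  | cons m rest ih =>
      intro turns cur hcur
      rcases hcur with rfl | ⟨u, rfl, hu⟩
      · by_cases hm : (pvRole m == "user") = true
        · simp only [pvGoA, hm, if_pos, List.nil_append]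
          simp only [ne_eq, not_true_eq_false, if_neg, not_false_iff]
          rw [ih turns [m] (Or.inr ⟨m, rfl, hm⟩)]
          simp
        · simp only [pvGoA, hm, List.nil_append]
          rw [ih (turns ++ [[m]]) [] (Or.inl rfl), alt_cons_nonuser m rest hm]
          simp
      · by_cases hm : (pvRole m == "user") = true
        · simp only [pvGoA, hm, if_pos]
          have : ([u] : List (List (String × String))) ≠ [] := by simp
          rw [if_pos this, ih (turns ++ [[u]]) [m] (Or.inr ⟨m, rfl, hm⟩)]
          have : group_dialogue_turns_py_alt (u :: m :: rest)
              = [u] :: group_dialogue_turns_py_alt (m :: rest) := by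
            simp [group_dialogue_turns_py_alt, hm]
          simp [this]
        · simp only [pvGoA, hm]
          rw [ih (turns ++ [[u] ++ [m]]) [] (Or.inl rfl)]
          have : group_dialogue_turns_py_alt (u :: m :: rest)
              = [u, m] :: group_dialogue_turns_py_alt rest := by
            simp [group_dialogue_turns_py_alt, hu, hm]
          simp [this]

-- ===== VERDICT (by name: the statement is the Claim_ definition above) =====
theorem group_dialogue_turns_py_spec : Claim_equal_group_dialogue_turns_py := by
  intro messages _ _
  unfold Spec_group_dialogue_turns_py group_dialogue_turns_py
  simpa using goA_eq_alt messages [] [] (Or.inl rfl)
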